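-- pv_equiv track=rewrite | github.com/EfronC/Delocalizer | honorifics.py | clean_left
-- ===== SOURCE A (Python) =====
-- def clean_left(word):
-- 	r = ""
-- 	for i in word[::-1]:
-- 		if i.isalpha():
-- 			r += i
-- 		else:
-- 			break
--
-- 	return r[::-1]
-- ===== SOURCE B (Python) =====
-- def clean_left(word):
--     start = 0
--     for i, c in enumerate(word):
--         if not c.isalpha():
--             start = i + 1
--     return word[start:]
-- ===== Notes on version B (the rewrite author's own statement) =====
-- stated objective: alternative
-- what changed: B replaces A's backward scan that accumulates alphabetic characters one by one and reverses the result with a single forward pass that tracks the index just after the last non-alphabetic character and returns the slice word[start:].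
import Mathlib
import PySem

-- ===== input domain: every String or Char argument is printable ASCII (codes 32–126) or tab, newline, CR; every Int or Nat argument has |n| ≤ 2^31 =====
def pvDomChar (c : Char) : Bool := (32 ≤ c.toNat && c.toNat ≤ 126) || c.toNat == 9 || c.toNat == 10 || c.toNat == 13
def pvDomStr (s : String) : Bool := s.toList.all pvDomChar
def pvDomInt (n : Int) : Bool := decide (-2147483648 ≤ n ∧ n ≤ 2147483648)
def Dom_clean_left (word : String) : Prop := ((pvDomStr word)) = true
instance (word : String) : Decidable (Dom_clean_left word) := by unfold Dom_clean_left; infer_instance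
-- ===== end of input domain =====

-- B scans forward tracking the position just after the last non-alphabetic character and slices,
-- instead of A's backward accumulate-and-break-and-reverse. Same cost; objective: alternative.

-- ===== PORT A =====
-- for i in word[::-1]: if i.isalpha(): r += i else: break   (r accumulated left to right)
def cleanLeftLoopA (r : List Char) (cs : List Char) : List Char :=
  match cs with
  | [] => r
  | c :: rest => if PySem.Chars.isalpha c then cleanLeftLoopA (r ++ [c]) rest else r

def clean_left (word : String) : String :=
  String.ofList (cleanLeftLoopA [] word.toList.reverse).reverse

-- ===== PORT B =====
-- start = 0; for i, c in enumerate(word): if not c.isalpha(): start = i + 1; return word[start:]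
def clean_left_alt (word : String) : String :=
  let start : Int :=
    (PySem.List.enumerate word.toList 0).foldl
      (fun s p => if ¬ PySem.Chars.isalpha p.2 then p.1 + 1 else s) 0
  String.ofList (PySem.List.slice word.toList (some start) none)

-- ===== PRECONDITION & SPEC =====
def Spec_clean_left (word : String) (out : String) : Prop := out = clean_left_alt word
instance (word : String) (out : String) : Decidable (Spec_clean_left word out) := by unfold Spec_clean_left; infer_instance

-- ===== CLAIM (what is proved, stated in full; the proofs are below) =====
def Claim_equal_clean_left : Prop := ∀ (word : String), Dom_clean_left word → Spec_clean_left word (clean_left word)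

-- ===== LEMMAS AND PROOFS =====\n
-- A's loop appends the takeWhile-alpha prefix to the accumulator
theorem cleanLeftLoopA_eq (r cs : List Char) :
    cleanLeftLoopA r cs = r ++ cs.takeWhile PySem.Chars.isalpha := by
  induction cs generalizing r with
  | nil => simp [cleanLeftLoopA]
  | cons c rest ih =>
    simp only [cleanLeftLoopA, List.takeWhile]
    by_cases h : PySem.Chars.isalpha c = true
    · simp [h, ih]
    · simp [h]

-- B's fold computes length − (length of the alpha suffix), as an Int
theorem foldB_eq (cs : List Char) :
    (PySem.List.enumerate cs 0).foldl
      (fun s p => if ¬ PySem.Chars.isalpha p.2 then p.1 + 1 else s) 0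
    = (cs.length : Int) - (cs.reverse.takeWhile PySem.Chars.isalpha).length := by
  induction cs using List.reverseRecOn with
  | nil => simp
  | append_singleton cs c ih =>
    rw [PySem.List.enumerate_append, List.foldl_append, ih,
      PySem.List.enumerate_cons, PySem.List.enumerate_nil,
      List.foldl_cons, List.foldl_nil]
    by_cases h : PySem.Chars.isalpha c = true
    · rw [if_neg (by simp [h])]
      simp only [List.reverse_append, List.reverse_cons, List.reverse_nil, List.nil_append,
        List.singleton_append, List.takeWhile_cons, h, if_true, List.length_cons,
        List.length_append]
      push_cast
      simp
    · rw [if_pos (by simp [h])]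
      simp only [List.reverse_append, List.reverse_cons, List.reverse_nil, List.nil_append,
        List.singleton_append, List.takeWhile_cons, h, Bool.false_eq_true, if_false,
        List.length_nil, List.length_append, List.length_singleton]
      push_cast
      ring

-- takeWhile is a prefix of the given length
theorem takeWhile_eq_take (p : Char → Bool) (l : List Char) :
    l.takeWhile p = l.take (l.takeWhile p).length := by
  induction l with
  | nil => simp
  | cons c rest ih =>
    by_cases h : p c = true
    · simp only [List.takeWhile_cons, h, if_true, List.length_cons, List.take_succ_cons]
      exact congrArg _ ih
    · simp [h]

theorem length_takeWhile_le' (p : Char → Bool) (l : List Char) :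
    (l.takeWhile p).length ≤ l.length := by
  induction l with
  | nil => simp
  | cons c rest ih =>
    by_cases h : p c = true
    · simp only [List.takeWhile_cons, h, if_true, List.length_cons]; omega
    · simp [h]

-- the alpha suffix is what dropping to that index leaves
theorem drop_eq_suffix (cs : List Char) :
    cs.drop (cs.length - (cs.reverse.takeWhile PySem.Chars.isalpha).length)
      = (cs.reverse.takeWhile PySem.Chars.isalpha).reverse := by
  conv_rhs => rw [takeWhile_eq_take PySem.Chars.isalpha cs.reverse]
  rw [List.reverse_take]
  simp

theorem clean_left_agree (word : String) : clean_left word = clean_left_alt word := by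
  have hk : (word.toList.reverse.takeWhile PySem.Chars.isalpha).length ≤ word.toList.length := by
    have := length_takeWhile_le' PySem.Chars.isalpha word.toList.reverse
    simpa using this
  have h0 : (0 : Int) ≤ (word.toList.length : Int)
      - (word.toList.reverse.takeWhile PySem.Chars.isalpha).length := by omega
  have htn : ((word.toList.length : Int)
      - ((word.toList.reverse.takeWhile PySem.Chars.isalpha).length : Int)).toNat
      = word.toList.length - (word.toList.reverse.takeWhile PySem.Chars.isalpha).length := by
    omega
  unfold clean_left
  simp only [clean_left_alt, foldB_eq, PySem.List.slice_from _ h0, htn,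
    cleanLeftLoopA_eq, List.nil_append, drop_eq_suffix]

-- ===== VERDICT (by name: the statement is the Claim_ definition above) =====
theorem clean_left_spec : Claim_equal_clean_left := by
  intro word _
  unfold Spec_clean_left
  exact clean_left_agree word
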